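-- pv_equiv track=rewrite | github.com/JianZcar/EvoKana | src/utils/__init__.py | apply_layout
-- ===== SOURCE A (Python) =====
-- def apply_layout(seq, keys):
--     """
--     seq: 1D algorithm output list of ints (0 means skip)
--     keys: 2D keyboard template (0 = available, None = unusable)
--     """
--     mapped = [row[:] for row in keys]  # deep copy
--
--     # collect available positions (only the 0 slots)
--     slots = [(r, c)
--              for r, row in enumerate(keys)
--              for c, v in enumerate(row)
--              if v == 0]
--
--     slot_i = 0  # index into slots
--
--     for v in seq:
--         if v == 0:
--             # skip algorithm empty; DO NOT consume a 0 slot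
--             continue
--
--         if slot_i >= len(slots):
--             break  # no more available positions
--
--         r, c = slots[slot_i]
--         mapped[r][c] = v
--         slot_i += 1
--
--     clean = [[0 if v is None else int(v) for v in row] for row in mapped]
--     return clean
-- ===== SOURCE B (Python) =====
-- def apply_layout(seq, keys):
--     it = iter(v for v in seq if v != 0)
--     out = []
--     for row in keys:
--         new = []
--         for v in row:
--             if v is None:
--                 new.append(0)
--             elif v == 0:
--                 nxt = next(it, None)
--                 new.append(int(nxt) if nxt is not None else 0)
--             else:
--                 new.append(int(v))
--         out.append(new)
--     return out
-- ===== Notes on version B (the rewrite author's own statement) =====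
-- stated objective: simpler
-- what changed: B drops A's slot-coordinate table, mutable deep copy, and final cleaning pass: it filters seq once and builds the output in a single grid traversal that consumes the filtered values directly.
import Mathlib
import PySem

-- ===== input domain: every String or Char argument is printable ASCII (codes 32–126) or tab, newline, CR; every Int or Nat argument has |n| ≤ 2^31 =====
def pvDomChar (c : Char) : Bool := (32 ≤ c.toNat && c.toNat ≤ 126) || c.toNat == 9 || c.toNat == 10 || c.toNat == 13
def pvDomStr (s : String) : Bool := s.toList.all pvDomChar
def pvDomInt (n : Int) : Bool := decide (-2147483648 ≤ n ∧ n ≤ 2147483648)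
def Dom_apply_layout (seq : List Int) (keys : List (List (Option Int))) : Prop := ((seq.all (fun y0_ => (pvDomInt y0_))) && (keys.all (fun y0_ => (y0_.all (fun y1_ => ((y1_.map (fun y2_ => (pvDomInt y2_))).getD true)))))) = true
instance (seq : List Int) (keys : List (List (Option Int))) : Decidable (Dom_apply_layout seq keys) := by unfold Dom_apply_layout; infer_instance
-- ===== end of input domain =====

-- B replaces A's slot-coordinate table, mutable copy and final cleaning pass by a single
-- grid traversal consuming the filtered sequence (objective: simpler).

-- ===== PORT A =====
-- the `slots` comprehension of A: coordinates (r, c) of every cell equal to 0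
def pySlots (keys : List (List (Option Int))) : List (Nat × Nat) :=
  keys.zipIdx.flatMap (fun p =>
    p.1.zipIdx.filterMap (fun q => if q.1 = some 0 then some (p.2, q.2) else none))

-- the body of A's `for v in seq` loop; state = (mapped, slot_i)
def stepA (slots : List (Nat × Nat)) (st : List (List (Option Int)) × Nat) (v : Int) :
    List (List (Option Int)) × Nat :=
  if v = 0 then st
  else if slots.length ≤ st.2 then st      -- `break`: all further iterations leave the state unchanged
  else
    let rc := slots[st.2]!
    (st.1.set rc.1 ((st.1[rc.1]!).set rc.2 (some v)), st.2 + 1)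

def apply_layout (seq : List Int) (keys : List (List (Option Int))) : List (List Int) :=
  let mapped := keys                      -- `[row[:] for row in keys]`: a copy, identity on immutable lists
  let slots := pySlots keys
  let fin := seq.foldl (stepA slots) (mapped, 0)
  fin.1.map (fun row => row.map (fun v => v.getD 0))   -- `0 if v is None else int(v)`

-- ===== PORT B =====
-- one row: build the cleaned row directly, consuming fills (the filtered seq iterator) at 0-cells
def fillRow : List (Option Int) → List Int → List Int × List Int
  | [], fs => ([], fs)
  | c :: cs, fs =>
    match c with
    | none => let p := fillRow cs fs; (0 :: p.1, p.2)
    | some v =>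
      if v = 0 then
        match fs with
        | [] => let p := fillRow cs []; (0 :: p.1, p.2)
        | f :: rest => let p := fillRow cs rest; (f :: p.1, p.2)
      else let p := fillRow cs fs; (v :: p.1, p.2)

def fillGrid : List (List (Option Int)) → List Int → List (List Int)
  | [], _ => []
  | row :: rows, fs => let p := fillRow row fs; p.1 :: fillGrid rows p.2

def apply_layout_alt (seq : List Int) (keys : List (List (Option Int))) : List (List Int) :=
  fillGrid keys (seq.filter (fun v => v ≠ 0))

-- ===== PRECONDITION & SPEC =====
def Spec_apply_layout (seq : List Int) (keys : List (List (Option Int))) (out : List (List Int)) : Prop := out = apply_layout_alt seq keys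
instance (seq : List Int) (keys : List (List (Option Int))) (out : List (List Int)) : Decidable (Spec_apply_layout seq keys out) := by unfold Spec_apply_layout; infer_instance

-- ===== CLAIM (what is proved, stated in full; the proofs are below) =====
def Claim_equal_apply_layout : Prop := ∀ (seq : List Int) (keys : List (List (Option Int))), Dom_apply_layout seq keys → Spec_apply_layout seq keys (apply_layout seq keys)

-- ===== LEMMAS AND PROOFS =====

-- structural model of A's slot list
def rowCols : List (Option Int) → List Nat
  | [] => []
  | c :: cs => if c = some 0 then 0 :: (rowCols cs).map (· + 1) else (rowCols cs).map (· + 1)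

def gridSlots : List (List (Option Int)) → List (Nat × Nat)
  | [] => []
  | row :: rows =>
    (rowCols row).map (fun c => (0, c)) ++ (gridSlots rows).map (fun rc => (rc.1 + 1, rc.2))

theorem rowCols_spec (row : List (Option Int)) (r n : Nat) :
    (row.zipIdx n).filterMap (fun q => if q.1 = some 0 then some (r, q.2) else none)
      = (rowCols row).map (fun c => (r, c + n)) := by
  induction row generalizing n with
  | nil => simp [rowCols]
  | cons c cs ih =>
    simp only [List.zipIdx_cons, List.filterMap_cons, rowCols]
    by_cases h : c = some 0 <;>
      simp [h, ih (n+1), List.map_map, Function.comp_def, Nat.add_assoc, Nat.add_comm 1 n]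

theorem pySlots_aux (keys : List (List (Option Int))) (r : Nat) :
    (keys.zipIdx r).flatMap (fun p =>
        p.1.zipIdx.filterMap (fun q => if q.1 = some 0 then some (p.2, q.2) else none))
      = (gridSlots keys).map (fun rc => (rc.1 + r, rc.2)) := by
  induction keys generalizing r with
  | nil => simp [gridSlots]
  | cons row rows ih =>
    simp only [List.zipIdx_cons, List.flatMap_cons, gridSlots, List.map_append]
    rw [ih (r+1), rowCols_spec row r 0]
    simp [List.map_map, Function.comp_def, Nat.add_assoc, Nat.add_comm 1 r]

theorem pySlots_eq (keys : List (List (Option Int))) : pySlots keys = gridSlots keys := by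
  have := pySlots_aux keys 0
  simpa [pySlots] using this

-- A's write loop, as a recursion on (slots, fills)
def writeFills : List (Nat × Nat) → List (List (Option Int)) → List Int → List (List (Option Int))
  | [], m, _ => m
  | _ :: _, m, [] => m
  | rc :: ss, m, f :: fs => writeFills ss (m.set rc.1 ((m[rc.1]!).set rc.2 (some f))) fs

theorem writeFills_nil_fills (ss : List (Nat × Nat)) (m : List (List (Option Int))) :
    writeFills ss m [] = m := by cases ss <;> rfl

theorem foldl_stepA_filter (slots : List (Nat × Nat)) (seq : List Int)
    (st : List (List (Option Int)) × Nat) :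
    seq.foldl (stepA slots) st = (seq.filter (fun v => v ≠ 0)).foldl (stepA slots) st := by
  induction seq generalizing st with
  | nil => rfl
  | cons v vs ih =>
    by_cases h : v = 0
    · simp [h, List.foldl_cons, stepA, ih]
    · simp [h, List.foldl_cons, ih]

theorem foldl_stepA_break (slots : List (Nat × Nat)) (fs : List Int)
    (st : List (List (Option Int)) × Nat) (h : slots.length ≤ st.2) :
    fs.foldl (stepA slots) st = st := by
  induction fs with
  | nil => rfl
  | cons f fs ih => simp [List.foldl_cons, stepA, h, ih]

theorem foldl_stepA_write (slots : List (Nat × Nat)) (fs : List Int)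
    (m : List (List (Option Int))) (i : Nat) (hf : ∀ f ∈ fs, f ≠ 0) :
    (fs.foldl (stepA slots) (m, i)).1 = writeFills (slots.drop i) m fs := by
  induction fs generalizing m i with
  | nil => simp [writeFills_nil_fills]
  | cons f fs ih =>
    have hf0 : f ≠ 0 := hf f (by simp)
    by_cases h : slots.length ≤ i
    · rw [List.drop_eq_nil_of_le h]
      rw [List.foldl_cons]
      rw [show stepA slots (m, i) f = (m, i) by simp [stepA, hf0, h]]
      rw [foldl_stepA_break slots fs (m, i) h]
      rfl
    · have hlt : i < slots.length := Nat.lt_of_not_le h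
      rw [List.drop_eq_getElem_cons hlt]
      rw [List.foldl_cons]
      rw [show stepA slots (m, i) f
            = (m.set slots[i].1 ((m[slots[i].1]!).set slots[i].2 (some f)), i + 1) by
          simp [stepA, hf0, h, List.getElem!_eq_getElem?_getD, List.getElem?_eq_getElem hlt]]
      rw [ih _ _ (fun g hg => hf g (by simp [hg]))]
      rfl

theorem writeFills_append (s1 s2 : List (Nat × Nat)) (m : List (List (Option Int)))
    (fs : List Int) :
    writeFills (s1 ++ s2) m fs = writeFills s2 (writeFills s1 m fs) (fs.drop s1.length) := by
  induction s1 generalizing m fs with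
  | nil => simp [writeFills]
  | cons rc ss ih =>
    cases fs with
    | nil => simp [writeFills_nil_fills, writeFills]
    | cons f fs => simp [writeFills, ih]

theorem writeFills_shift (ss : List (Nat × Nat)) (row : List (Option Int))
    (rows : List (List (Option Int))) (fs : List Int) :
    writeFills (ss.map (fun rc => (rc.1 + 1, rc.2))) (row :: rows) fs
      = row :: writeFills ss rows fs := by
  induction ss generalizing rows fs with
  | nil => rfl
  | cons rc ss ih =>
    cases fs with
    | nil => simp [writeFills_nil_fills]
    | cons f fs => simp [writeFills, ih]

-- per-row write loop
def writeRow : List Nat → List (Option Int) → List Int → List (Option Int)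
  | [], h, _ => h
  | _ :: _, h, [] => h
  | c :: cs, h, f :: fs => writeRow cs (h.set c (some f)) fs

theorem writeRow_nil_fills (cs : List Nat) (h : List (Option Int)) :
    writeRow cs h [] = h := by cases cs <;> rfl

theorem writeFills_row (cols : List Nat) (h : List (Option Int))
    (rows : List (List (Option Int))) (fs : List Int) :
    writeFills (cols.map (fun c => (0, c))) (h :: rows) fs
      = writeRow cols h fs :: rows := by
  induction cols generalizing h fs with
  | nil => simp [writeFills, writeRow]
  | cons c cs ih =>
    cases fs with
    | nil => simp [writeFills_nil_fills, writeRow_nil_fills]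
    | cons f fs => simp [writeFills, writeRow, ih]

theorem writeRow_shift (cols : List Nat) (c : Option Int) (h : List (Option Int))
    (fs : List Int) :
    writeRow (cols.map (· + 1)) (c :: h) fs = c :: writeRow cols h fs := by
  induction cols generalizing h fs with
  | nil => rfl
  | cons c' cs ih =>
    cases fs with
    | nil => simp [writeRow_nil_fills]
    | cons f fs => simp [writeRow, ih]

theorem fillRow_spec (row : List (Option Int)) (fs : List Int) :
    (fillRow row fs).1 = (writeRow (rowCols row) row fs).map (fun v => v.getD 0)
    ∧ (fillRow row fs).2 = fs.drop (rowCols row).length := by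
  induction row generalizing fs with
  | nil => simp [fillRow, rowCols, writeRow]
  | cons c cs ih =>
    match c with
    | none =>
      have h1 := ih fs
      simp only [fillRow, rowCols, show ((none : Option Int) = some 0) = False by simp, if_false]
      rw [writeRow_shift]
      simp [h1.1, h1.2]
    | some v =>
      by_cases hv : v = 0
      · subst hv
        cases fs with
        | nil =>
          have h1 := ih ([] : List Int)
          simp only [fillRow, rowCols, ite_true]
          rw [writeRow_nil_fills]
          simp [writeRow_nil_fills, h1.1, h1.2]
        | cons f fs' =>
          have h1 := ih fs'
          simp only [fillRow, rowCols, ite_true]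
          rw [show writeRow (0 :: (rowCols cs).map (· + 1)) (some 0 :: cs) (f :: fs')
                = writeRow ((rowCols cs).map (· + 1)) (some f :: cs) fs' by
              simp [writeRow]]
          rw [writeRow_shift]
          simp [h1.1, h1.2]
      · have h1 := ih fs
        simp only [fillRow, rowCols, hv, ite_false,
          show (some v = some 0) = False by simp [hv]]
        rw [writeRow_shift]
        simp [h1.1, h1.2]

theorem fillGrid_spec (keys : List (List (Option Int))) (fs : List Int) :
    fillGrid keys fs
      = (writeFills (gridSlots keys) keys fs).map (fun row => row.map (fun v => v.getD 0)) := by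
  induction keys generalizing fs with
  | nil => rfl
  | cons row rows ih =>
    have hr := fillRow_spec row fs
    simp only [fillGrid, gridSlots]
    rw [writeFills_append, writeFills_row, writeFills_shift, List.length_map]
    simp only [List.map_cons]
    rw [← hr.1, hr.2, ih]

-- ===== VERDICT (by name: the statement is the Claim_ definition above) =====
theorem apply_layout_spec : Claim_equal_apply_layout := by
  intro seq keys _
  unfold Spec_apply_layout apply_layout apply_layout_alt
  simp only
  rw [pySlots_eq, foldl_stepA_filter,
    foldl_stepA_write (gridSlots keys) _ keys 0 (fun f hf => by
      simpa using (List.mem_filter.mp hf).2),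
    List.drop_zero, fillGrid_spec]
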